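-- pv_equiv track=rewrite | github.com/dongwoo-john-ku/leakapp-rfid-python-mbTcp | uInterfaceUhfMultiReading.py | boolean_def
-- ===== SOURCE A (Python) =====
-- def boolean_def(word):
--     data = []
--     b = 1
--     for i in range(0, 16):
--         if word & (b<<i) == 0:
--             data.append("False")
--         else:
--             data.append("True")
--     return data
-- ===== SOURCE B (Python) =====
-- # Per-nibble lookup table: entry k lists bits 0..3 of k ("True"/"False"), LSB first.
-- _NIBBLE = [
--     ["False", "False", "False", "False"],
--     ["True", "False", "False", "False"],
--     ["False", "True", "False", "False"],
--     ["True", "True", "False", "False"],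
--     ["False", "False", "True", "False"],
--     ["True", "False", "True", "False"],
--     ["False", "True", "True", "False"],
--     ["True", "True", "True", "False"],
--     ["False", "False", "False", "True"],
--     ["True", "False", "False", "True"],
--     ["False", "True", "False", "True"],
--     ["True", "True", "False", "True"],
--     ["False", "False", "True", "True"],
--     ["True", "False", "True", "True"],
--     ["False", "True", "True", "True"],
--     ["True", "True", "True", "True"],
-- ]
--
--
-- def boolean_def(word):
--     n = word & 0xFFFF
--     out = []
--     for shift in (0, 4, 8, 12):
--         out += _NIBBLE[(n >> shift) & 0xF]
--     return out
-- ===== Notes on version B (the rewrite author's own statement) =====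
-- stated objective: alternative
-- what changed: B replaces A's per-bit mask-and-test loop over all bit positions with a precomputed nibble lookup table: the word is masked to its low two bytes once, split into four nibbles, and each nibble's four-string row is read from the table and concatenated.
import Mathlib
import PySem

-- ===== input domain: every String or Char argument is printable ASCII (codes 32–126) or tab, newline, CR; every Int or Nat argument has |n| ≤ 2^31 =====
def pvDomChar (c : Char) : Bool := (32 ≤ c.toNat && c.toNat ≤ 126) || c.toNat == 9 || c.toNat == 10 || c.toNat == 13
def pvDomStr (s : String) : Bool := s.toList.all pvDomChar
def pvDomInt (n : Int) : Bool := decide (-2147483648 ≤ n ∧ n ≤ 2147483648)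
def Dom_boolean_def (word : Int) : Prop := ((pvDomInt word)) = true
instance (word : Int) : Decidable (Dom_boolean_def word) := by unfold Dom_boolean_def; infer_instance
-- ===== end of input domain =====

-- B replaces A's 16-iteration per-bit mask-and-test loop by a precomputed 16-entry nibble
-- lookup table: mask the word to 16 bits once, split it into four nibbles, concatenate the
-- table rows; alternative algorithm, same cost.

-- ===== PORT A =====
-- for i in range(0,16): append "False" if word & (1<<i) == 0 else "True"
-- (Int.shiftLeft is Python's << for the nonnegative shift amounts that occur here)
def boolean_def (word : Int) : List String :=
  (PySem.List.pyRange 0 16 1).foldl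
    (fun data i =>
      data ++ [if PySem.Int.band word (Int.shiftLeft 1 i.toNat) = 0 then "False" else "True"])
    []

-- ===== PORT B =====
-- the literal _NIBBLE table of Source B (row k = bits 0..3 of k, LSB first)
def bdNibble : List (List String) :=
  [ ["False", "False", "False", "False"],
    ["True", "False", "False", "False"],
    ["False", "True", "False", "False"],
    ["True", "True", "False", "False"],
    ["False", "False", "True", "False"],
    ["True", "False", "True", "False"],
    ["False", "True", "True", "False"],
    ["True", "True", "True", "False"],
    ["False", "False", "False", "True"],
    ["True", "False", "False", "True"],
    ["False", "True", "False", "True"],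
    ["True", "True", "False", "True"],
    ["False", "False", "True", "True"],
    ["True", "False", "True", "True"],
    ["False", "True", "True", "True"],
    ["True", "True", "True", "True"] ]

-- n = word & 0xFFFF; for shift in (0,4,8,12): out += _NIBBLE[(n >> shift) & 0xF]
-- (Int's '>>>' is Python's >> ; the index is always 0..15, so getD never hits its default)
def boolean_def_alt (word : Int) : List String :=
  let n := PySem.Int.band word 65535
  ([0, 4, 8, 12] : List Nat).foldl
    (fun out (shift : Nat) => out ++ bdNibble.getD (PySem.Int.band (n >>> shift) 15).toNat [])
    []

-- ===== PRECONDITION & SPEC =====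
def Spec_boolean_def (word : Int) (out : List String) : Prop := out = boolean_def_alt word
instance (word : Int) (out : List String) : Decidable (Spec_boolean_def word out) := by unfold Spec_boolean_def; infer_instance

-- ===== CLAIM (what is proved, stated in full; the proofs are below) =====
def Claim_equal_boolean_def : Prop := ∀ (word : Int), Dom_boolean_def word → Spec_boolean_def word (boolean_def word)

-- ===== LEMMAS AND PROOFS =====

-- appending singletons in a foldl is mapping
theorem foldl_append_singleton {α β : Type} (f : α → β) (l : List α) (init : List β) :
    l.foldl (fun acc x => acc ++ [f x]) init = init ++ l.map f := by
  induction l generalizing init with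
  | nil => simp
  | cons x xs ih => simp [List.foldl, ih]

-- the masked word is a 16-bit natural whose bits are exactly A's bit tests
theorem band_mask_bits (word : Int) :
    ∃ m : Nat, m < 65536 ∧ PySem.Int.band word 65535 = (m : Int) ∧
      ∀ i : Nat, i < 16 →
        (PySem.Int.band word (Int.shiftLeft 1 i) = 0 ↔ m.testBit i = false) := by
  have hsh : ∀ i : Nat, Int.shiftLeft 1 i = ((2 ^ i : Nat) : Int) := by
    intro i; simp [Int.shiftLeft, Nat.shiftLeft_eq]
  by_cases hw : 0 ≤ word
  · refine ⟨word.toNat &&& 65535, ?_, ?_, ?_⟩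
    · have : word.toNat &&& 65535 = word.toNat % 65536 := by
        have := Nat.and_two_pow_sub_one_eq_mod word.toNat 16
        norm_num at this; exact this
      omega
    · rw [PySem.Int.band_of_nonneg hw (by norm_num)]
      norm_num
      congr 1
    · intro i hi
      rw [hsh i, PySem.Int.band_of_nonneg hw (by positivity), Int.toNat_natCast,
        Nat.and_two_pow]
      have hmask : word.toNat &&& 65535 = word.toNat % 65536 := by
        have := Nat.and_two_pow_sub_one_eq_mod word.toNat 16
        norm_num at this; exact this
      have h3 : (word.toNat &&& 65535).testBit i = word.toNat.testBit i := by
        rw [hmask]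
        have h16 : (65536 : Nat) = 2 ^ 16 := by norm_num
        rw [h16, Nat.testBit_mod_two_pow]
        simp [hi]
      rw [h3]
      rcases hb : word.toNat.testBit i with _ | _ <;> simp
  · have hwneg : word < 0 := by omega
    set y : Nat := (-word - 1).toNat with hy
    have hband : ∀ b : Int, 0 ≤ b →
        PySem.Int.band word b = ((b.toNat - (b.toNat &&& y) : Nat) : Int) := by
      intro b hb
      simp [PySem.Int.band, hw, hb, hy]
    have hr : (65535 &&& y) = y % 65536 := by
      rw [Nat.and_comm]
      have := Nat.and_two_pow_sub_one_eq_mod y 16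
      norm_num at this; exact this
    have hlt : y % 65536 < 2 ^ 16 := by omega
    have hyb : (y % 65536).testBit = fun i => if i < 16 then y.testBit i else false := by
      funext i
      have h16 : (65536 : Nat) = 2 ^ 16 := by norm_num
      rw [h16, Nat.testBit_mod_two_pow]
      by_cases h : i < 16 <;> simp [h]
    have hm : ∀ i : Nat, i < 16 →
        (65535 - (65535 &&& y)).testBit i = !(y.testBit i) := by
      intro i hi
      rw [hr]
      have he : (65535 : Nat) - y % 65536 = 2 ^ 16 - (y % 65536 + 1) := by omega
      rw [he, Nat.testBit_two_pow_sub_succ hlt]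
      rw [hyb]
      simp [hi]
    refine ⟨65535 - (65535 &&& y), by omega, ?_, ?_⟩
    · have := hband 65535 (by norm_num)
      simpa using this
    · intro i hi
      rw [hsh i, hband _ (by positivity), Int.toNat_natCast, Nat.two_pow_and, hm i hi]
      have hp : 0 < 2 ^ i := Nat.two_pow_pos i
      constructor
      · intro h0
        have h1 : ((2 ^ i - 2 ^ i * (y.testBit i).toNat : Nat) : Int) = 0 := h0
        have h2 : 2 ^ i - 2 ^ i * (y.testBit i).toNat = 0 := by exact_mod_cast h1
        rcases hb : y.testBit i with _ | _
        · rw [hb] at h2; simp at h2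
        · simp
      · intro hmf
        have hb : y.testBit i = true := by
          rcases hb : y.testBit i with _ | _
          · rw [hb] at hmf; simp at hmf
          · rfl
        rw [hb]
        norm_num

-- a nibble's table row lists its four bits
theorem bdNibble_row (k : Nat) (hk : k < 16) :
    bdNibble.getD k [] =
      (List.range 4).map (fun i => if k.testBit i = false then "False" else "True") := by
  interval_cases k <;> decide

-- B on the masked natural reads off the sixteen bits
theorem alt_eq_map (m : Nat) :
    ([0, 4, 8, 12] : List Nat).foldl
        (fun out (shift : Nat) =>
          out ++ bdNibble.getD (PySem.Int.band ((m : Int) >>> shift) 15).toNat [])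
        ([] : List String) =
      (List.range 16).map (fun i => if m.testBit i = false then "False" else "True") := by
  have hval : ∀ s : Nat, (PySem.Int.band ((m : Int) >>> s) 15).toNat = (m >>> s) &&& 15 := by
    intro s
    have h1 : ((m : Int) >>> s) = ((m >>> s : Nat) : Int) := by
      simp [Int.shiftRight_eq_div_pow, Nat.shiftRight_eq_div_pow]
    rw [h1, show (15 : Int) = ((15 : Nat) : Int) from rfl, PySem.Int.band_natCast,
      Int.toNat_natCast]
  have hlt : ∀ s : Nat, (m >>> s) &&& 15 < 16 := by
    intro s
    have := Nat.and_le_right (n := m >>> s) (m := 15)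
    omega
  have hbit : ∀ s i : Nat, i < 4 → ((m >>> s) &&& 15).testBit i = m.testBit (s + i) := by
    intro s i hi
    rw [Nat.testBit_and, Nat.testBit_shiftRight]
    have h15 : Nat.testBit 15 i = true := by interval_cases i <;> decide
    simp [h15]
  simp only [List.foldl_cons, List.foldl_nil, List.nil_append]
  rw [hval 0, hval 4, hval 8, hval 12, bdNibble_row _ (hlt 0), bdNibble_row _ (hlt 4),
    bdNibble_row _ (hlt 8), bdNibble_row _ (hlt 12)]
  have hrange4 : List.range 4 = [0, 1, 2, 3] := by decide
  have hrange16 : List.range 16 = [0,1,2,3,4,5,6,7,8,9,10,11,12,13,14,15] := by decide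
  simp only [hrange4, hrange16, List.map_cons, List.map_nil, List.nil_append,
    List.cons_append]
  rw [hbit 0 0 (by norm_num), hbit 0 1 (by norm_num), hbit 0 2 (by norm_num), hbit 0 3 (by norm_num), hbit 4 0 (by norm_num), hbit 4 1 (by norm_num), hbit 4 2 (by norm_num), hbit 4 3 (by norm_num), hbit 8 0 (by norm_num), hbit 8 1 (by norm_num), hbit 8 2 (by norm_num), hbit 8 3 (by norm_num), hbit 12 0 (by norm_num), hbit 12 1 (by norm_num), hbit 12 2 (by norm_num), hbit 12 3 (by norm_num)]

-- ===== VERDICT (by name: the statement is the Claim_ definition above) =====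
theorem boolean_def_spec : Claim_equal_boolean_def := by
  intro word _
  unfold Spec_boolean_def boolean_def boolean_def_alt
  obtain ⟨m, _, hmeq, hbit⟩ := band_mask_bits word
  simp only [hmeq, alt_eq_map]
  have hpr : PySem.List.pyRange 0 16 1 = (List.range 16).map Int.ofNat := by decide
  rw [hpr, foldl_append_singleton, List.nil_append, List.map_map]
  apply List.map_congr_left
  intro i hi
  have hi16 : i < 16 := List.mem_range.mp hi
  simp only [Function.comp_apply]
  have ht : (Int.ofNat i).toNat = i := rfl
  rw [ht]
  by_cases h : PySem.Int.band word (Int.shiftLeft 1 i) = 0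
  · rw [if_pos h, if_pos ((hbit i hi16).mp h)]
  · rw [if_neg h, if_neg (fun hc => h ((hbit i hi16).mpr hc))]
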